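-- pv_equiv track=rewrite | github.com/weikunhan/leetcode-summary-python | practice/others/subsequence_removal_ii.py | subsequence_removal_ii
-- ===== SOURCE A (Python) =====
-- def subsequence_removal_ii(nums):
--     """
--     :type nums: List[int]
--     :rtype: List[int]
--     """
--
--     res = []
--
--     if sorted(nums) == nums and len(nums) == len(set(nums)):
--
--         return res
--
--     for i in range(len(nums)):
--         sub_value_list = []
--         target_value_list = nums[:i]
--
--         for j in range(i, len(nums)):
--             temp_list = []
--
--             if i == j:
--                 sub_value_list.append(nums[j])
--                 temp_list = target_value_list + nums[j + 1:]
--             else: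
--                 if nums[j] < sub_value_list[-1]:
--                     target_value_list.append(nums[j])
--                 else:
--                     sub_value_list.append(nums[j])
--
--                 temp_list = target_value_list + nums[j + 1:]
--
--             if sorted(temp_list) == temp_list and len(temp_list) == len(set(temp_list)):
--                 if not res or len(res) < len(temp_list):
--                     res = temp_list
--
--     if not res:
--         res = [-1]
--
--     return res
-- ===== SOURCE B (Python) =====
-- def subsequence_removal_ii(nums):
--     """
--     :type nums: List[int]
--     :rtype: List[int]
--     """
--
--     n = len(nums)
--     # sufinc[k] is True iff the suffix made of the last k elements is strictly increasing
--     sufinc = [True]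
--     for k in range(n):
--         j = n - 1 - k
--         sufinc.append(sufinc[k] and (k == 0 or nums[j] < nums[j + 1]))
--     if sufinc[n]:
--         return []
--     best = []
--     prevalid = True              # nums[:i] strictly increasing so far
--     for i in range(n):
--         target = nums[:i]
--         tvalid = prevalid
--         tlast = nums[i - 1] if i > 0 else None
--         sublast = nums[i]
--         for j in range(i, n):
--             if j > i:
--                 if nums[j] < sublast:
--                     if tlast is not None and tlast >= nums[j]:
--                         tvalid = False
--                     target.append(nums[j])
--                     tlast = nums[j]
--                 else:
--                     sublast = nums[j]
--             if tvalid and sufinc[n - j - 1] and (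
--                     tlast is None or j + 1 == n or tlast < nums[j + 1]):
--                 if not best or len(best) < len(target) + (n - j - 1):
--                     best = target + nums[j + 1:]
--         prevalid = prevalid and (i == 0 or nums[i - 1] < nums[i])
--     return best if best else [-1]
-- ===== Notes on version B (the rewrite author's own statement) =====
-- stated objective: faster
-- what changed: B precomputes a suffix strictly-increasing table and maintains the kept prefix's validity and last element incrementally, so each candidate is judged in O(1) instead of A's rebuilding the list and re-running sorted()+set() for every (i,j) pair.
import Mathlib
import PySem

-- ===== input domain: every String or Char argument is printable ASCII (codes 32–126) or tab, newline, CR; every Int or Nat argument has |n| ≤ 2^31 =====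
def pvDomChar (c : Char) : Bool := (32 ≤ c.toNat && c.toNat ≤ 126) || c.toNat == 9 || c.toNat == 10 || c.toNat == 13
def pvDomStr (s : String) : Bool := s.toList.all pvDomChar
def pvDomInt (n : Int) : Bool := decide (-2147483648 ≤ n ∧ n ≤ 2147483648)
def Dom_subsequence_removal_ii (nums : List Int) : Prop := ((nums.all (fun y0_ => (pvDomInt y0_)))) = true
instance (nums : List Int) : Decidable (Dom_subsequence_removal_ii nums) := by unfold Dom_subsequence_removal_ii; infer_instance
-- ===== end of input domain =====

-- B replaces A's per-pair rebuild-and-rescan (sorted/set on every candidate) by an incremental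
-- strictly-increasing check plus a precomputed suffix-validity table: O(n^2) instead of A's O(n^3 log n).

-- ===== PORT A =====
-- 'sorted(l) == l and len(l) == len(set(l))' (A's validity test, used twice)
def pvChkA (l : List Int) : Bool :=
  (PySem.List.sorted l (fun x => x) false == l) &&
  (l.length == (PySem.Set.ofList l).length)

-- body of A's inner loop; state = (sub_value_list, target_value_list, res)
def pvAInner (nums : List Int) (i : Int) (st : List Int × List Int × List Int) (j : Int) :
    List Int × List Int × List Int :=
  let x := PySem.List.pyGetD nums j 0
  let p : List Int × List Int :=
    if i == j then (st.1 ++ [x], st.2.1)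
    else if decide (x < PySem.List.pyGetD st.1 (-1) 0) then (st.1, st.2.1 ++ [x])
    else (st.1 ++ [x], st.2.1)
  let temp := p.2 ++ PySem.List.slice nums (some (j + 1)) none
  let res := if pvChkA temp && (st.2.2.isEmpty || decide (st.2.2.length < temp.length)) then temp
             else st.2.2
  (p.1, p.2, res)

def subsequence_removal_ii (nums : List Int) : List Int :=
  let n : Int := nums.length
  if pvChkA nums then []
  else
    let res := (PySem.List.pyRange 0 n 1).foldl (fun res i =>
      ((PySem.List.pyRange i n 1).foldl (pvAInner nums i)
        ([], PySem.List.slice nums none (some i), res)).2.2) []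
    if res.isEmpty then [-1] else res

-- ===== PORT B =====
-- body of B's suffix-table loop: sufinc[k] = "last k elements strictly increasing"
def pvSufStep (nums : List Int) (n : Int) (s : List Bool) (k : Int) : List Bool :=
  let j := n - 1 - k
  s ++ [PySem.List.pyGetD s k true &&
        ((k == 0) || decide (PySem.List.pyGetD nums j 0 < PySem.List.pyGetD nums (j + 1) 0))]

-- body of B's inner loop; state q = (target, tlast, sublast, best, tvalid)
def pvBInner (nums : List Int) (sufinc : List Bool) (n i : Int)
    (q : List Int × Option Int × Int × List Int × Bool) (j : Int) :
    List Int × Option Int × Int × List Int × Bool :=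
  let x := PySem.List.pyGetD nums j 0
  let u : List Int × Option Int × Int × Bool :=
    if decide (i < j) then
      if decide (x < q.2.2.1) then
        (q.1 ++ [x], some x, q.2.2.1,
          if (match q.2.1 with | some t => decide (t ≥ x) | none => false) then false
          else q.2.2.2.2)
      else (q.1, q.2.1, x, q.2.2.2.2)
    else (q.1, q.2.1, q.2.2.1, q.2.2.2.2)
  let ok := u.2.2.2 && PySem.List.pyGetD sufinc (n - j - 1) true &&
    (match u.2.1 with
     | none => true
     | some t => (j + 1 == n) || decide (t < PySem.List.pyGetD nums (j + 1) 0))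
  let best :=
    if ok && (q.2.2.2.1.isEmpty ||
              decide ((q.2.2.2.1.length : Int) < (u.1.length : Int) + (n - j - 1)))
    then u.1 ++ PySem.List.slice nums (some (j + 1)) none else q.2.2.2.1
  (u.1, u.2.1, u.2.2.1, best, u.2.2.2)

-- body of B's outer loop; state = (best, prevalid)
def pvBOuter (nums : List Int) (sufinc : List Bool) (n : Int)
    (st : List Int × Bool) (i : Int) : List Int × Bool :=
  let target := PySem.List.slice nums none (some i)
  let tlast : Option Int := if decide (0 < i) then some (PySem.List.pyGetD nums (i - 1) 0) else none
  let sublast := PySem.List.pyGetD nums i 0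
  let r := (PySem.List.pyRange i n 1).foldl (pvBInner nums sufinc n i)
    (target, tlast, sublast, st.1, st.2)
  (r.2.2.2.1,
   st.2 && ((i == 0) || decide (PySem.List.pyGetD nums (i - 1) 0 < PySem.List.pyGetD nums i 0)))

def subsequence_removal_ii_alt (nums : List Int) : List Int :=
  let n : Int := nums.length
  let sufinc := (PySem.List.pyRange 0 n 1).foldl (pvSufStep nums n) [true]
  if PySem.List.pyGetD sufinc n true then []
  else
    let best := ((PySem.List.pyRange 0 n 1).foldl (pvBOuter nums sufinc n) ([], true)).1
    if best.isEmpty then [-1] else best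

-- ===== PRECONDITION & SPEC =====
def Spec_subsequence_removal_ii (nums : List Int) (out : List Int) : Prop := out = subsequence_removal_ii_alt nums
instance (nums : List Int) (out : List Int) : Decidable (Spec_subsequence_removal_ii nums out) := by unfold Spec_subsequence_removal_ii; infer_instance

-- ===== CLAIM (what is proved, stated in full; the proofs are below) =====
def Claim_equal_subsequence_removal_ii : Prop := ∀ (nums : List Int), Dom_subsequence_removal_ii nums → Spec_subsequence_removal_ii nums (subsequence_removal_ii nums)

-- ===== LEMMAS AND PROOFS =====

-- A's "sorted(l) == l" is exactly "l is nondecreasing"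
lemma pv_sorted_eq_iff (l : List Int) :
    PySem.List.sorted l (fun x => x) false = l ↔ l.Pairwise (· ≤ ·) := by
  constructor
  · intro h
    have := PySem.List.sorted_pairwise l (fun x => x) (κ := Int)
    rw [h] at this
    simpa using this
  · intro h
    exact PySem.List.sorted_eq_self_of_pairwise l (fun x => x) (by simpa using h)

-- A's "len(l) == len(set(l))" is exactly "l has no duplicates"
lemma pv_ofList_len_iff (l : List Int) :
    (PySem.Set.ofList l).length = l.length ↔ l.Nodup := by
  induction l using List.reverseRecOn with
  | nil => simp [PySem.Set.ofList_nil]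
  | append_singleton xs x ih =>
    rw [PySem.Set.ofList_append_singleton]
    by_cases hx : x ∈ xs
    · have hmem : x ∈ PySem.Set.ofList xs := (PySem.Set.mem_ofList xs x).2 hx
      rw [PySem.Set.add_of_mem hmem]
      have hle := PySem.Set.length_ofList_le xs
      simp only [List.length_append, List.length_singleton]
      constructor
      · intro h; omega
      · intro h
        exact absurd hx (by simp [List.nodup_append] at h; tauto)
    · have hmem : x ∉ PySem.Set.ofList xs := fun h => hx ((PySem.Set.mem_ofList xs x).1 h)
      rw [PySem.Set.add_of_not_mem hmem]
      simp only [List.length_append, List.length_singleton]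
      rw [List.nodup_append]
      constructor
      · intro h
        refine ⟨ih.1 (by omega), by simp, ?_⟩
        intro a ha b hb
        simp only [List.mem_singleton] at hb
        intro hab; subst hab; subst hb; exact hx ha
      · intro ⟨h1, _, _⟩
        have := ih.2 h1; omega

-- A's validity test decides "strictly increasing"
lemma pv_chk_eq (l : List Int) : pvChkA l = decide (List.IsChain (· < ·) l) := by
  have key : List.IsChain (· < ·) l ↔ l.Pairwise (· ≤ ·) ∧ l.Nodup := by
    rw [List.isChain_iff_pairwise, List.Nodup]
    constructor
    · exact fun h => ⟨h.imp le_of_lt, h.imp ne_of_lt⟩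
    · rintro ⟨h1, h2⟩
      exact (h1.and h2).imp fun h => lt_of_le_of_ne h.1 h.2
  unfold pvChkA
  rw [Bool.eq_iff_iff]
  simp only [Bool.and_eq_true, beq_iff_eq, decide_eq_true_eq, key, pv_sorted_eq_iff]
  rw [← pv_ofList_len_iff]
  tauto

-- strictly increasing after appending one element
lemma pv_chain_concat (t : List Int) (x : Int) :
    decide (List.IsChain (· < ·) (t ++ [x])) =
      (decide (List.IsChain (· < ·) t) &&
        (match t.getLast? with | none => true | some y => decide (y < x))) := by
  cases h : t.getLast? with
  | none =>
    have ht : t = [] := List.getLast?_eq_none_iff.mp h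
    subst ht; simp
  | some y =>
    rw [Bool.eq_iff_iff]
    simp [List.isChain_append, h]

-- the suffix table built by B's first loop is correct
lemma pv_suf_aux (nums : List Int) : ∀ (K : Nat), K ≤ nums.length →
    (((PySem.List.pyRange 0 (K : Int) 1).foldl (pvSufStep nums (nums.length : Int)) [true]).length = K + 1) ∧
    (∀ k : Nat, k ≤ K →
      ((PySem.List.pyRange 0 (K : Int) 1).foldl (pvSufStep nums (nums.length : Int)) [true]).getD k true
        = decide (List.IsChain (· < ·) (nums.drop (nums.length - k)))) := by
  intro K
  induction K with
  | zero =>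
    intro _
    refine ⟨by simp, ?_⟩
    intro k hk
    interval_cases k
    simp
  | succ K ih =>
    intro hK
    obtain ⟨hlen, hget⟩ := ih (by omega)
    have hsplit : PySem.List.pyRange 0 ((K : Nat) + 1 : Int) 1
        = PySem.List.pyRange 0 (K : Int) 1 ++ [(K : Int)] :=
      PySem.List.pyRange_one_succ_right (by positivity)
    have hcast : ((K + 1 : Nat) : Int) = ((K : Nat) : Int) + 1 := by push_cast; ring
    rw [hcast, hsplit, List.foldl_append, List.foldl_cons, List.foldl_nil]
    set S := (PySem.List.pyRange 0 (K : Int) 1).foldl (pvSufStep nums (nums.length : Int)) [true] with hS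
    have hstep : pvSufStep nums (nums.length : Int) S (K : Int)
        = S ++ [decide (List.IsChain (· < ·) (nums.drop (nums.length - K))) &&
            (((K : Int) == 0) || decide (PySem.List.pyGetD nums ((nums.length : Int) - 1 - K) 0
                < PySem.List.pyGetD nums ((nums.length : Int) - 1 - K + 1) 0))] := by
      unfold pvSufStep
      rw [PySem.List.pyGetD_natCast, hget K (by omega)]
    rw [hstep]
    refine ⟨by simp [hlen], ?_⟩
    intro k hk
    by_cases hkK : k ≤ K
    · rw [List.getD_append _ _ _ _ (by omega)]
      exact hget k hkK
    · have hkeq : k = K + 1 := by omega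
      subst hkeq
      rw [List.getD_eq_getElem?_getD, List.getElem?_append_right (by omega)]
      have hidx : K + 1 - S.length = 0 := by omega
      rw [hidx]
      simp only [List.getElem?_cons_zero, Option.getD_some]
      -- now show the appended value equals decide (IsChain (drop (N - (K+1))))
      have hm : nums.length - (K + 1) + 1 = nums.length - K := by omega
      have hlt : nums.length - (K + 1) < nums.length := by omega
      have hd : nums.drop (nums.length - (K + 1))
          = nums[nums.length - (K + 1)]'hlt :: nums.drop (nums.length - K) := by
        rw [List.drop_eq_getElem_cons hlt, hm]
      by_cases hK0 : K = 0
      · subst hK0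
        have h0 : nums.drop nums.length = [] := by simp
        rw [hd]
        simp [h0, List.isChain_cons]
      · have hbeq : (((K : Nat) : Int) == 0) = false := by
          simp [Int.natCast_eq_zero]; omega
        rw [hbeq, hd]
        have hg1 : PySem.List.pyGetD nums ((nums.length : Int) - 1 - K) 0
            = nums[nums.length - (K + 1)]'hlt := by
          rw [PySem.List.pyGetD_eq_getElem _ _ (by omega) (by omega)]
          congr 1
          omega
        have hg2 : PySem.List.pyGetD nums ((nums.length : Int) - 1 - K + 1) 0
            = nums[nums.length - K]'(by omega) := by
          rw [PySem.List.pyGetD_eq_getElem _ _ (by omega) (by omega)]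
          congr 1
          omega
        rw [hg1, hg2]
        rw [Bool.eq_iff_iff]
        simp only [Bool.false_or, Bool.and_eq_true, decide_eq_true_eq, List.isChain_cons]
        rw [List.head?_drop, List.getElem?_eq_getElem (by omega : nums.length - K < nums.length)]
        simp only [Option.mem_some_iff]
        constructor
        · rintro ⟨h1, h2⟩
          exact ⟨fun b hb => hb ▸ h2, h1⟩
        · rintro ⟨h1, h2⟩
          exact ⟨h2, h1 _ rfl⟩

lemma pv_suf_spec (nums : List Int) (t : Int) (h0 : 0 ≤ t) (h1 : t ≤ (nums.length : Int)) :
    PySem.List.pyGetD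
      ((PySem.List.pyRange 0 (nums.length : Int) 1).foldl (pvSufStep nums (nums.length : Int)) [true]) t true
    = decide (List.IsChain (· < ·) (nums.drop ((nums.length : Int) - t).toNat)) := by
  have ht : t = ((t.toNat : Nat) : Int) := by omega
  rw [ht, PySem.List.pyGetD_natCast]
  have h2 := (pv_suf_aux nums nums.length le_rfl).2 t.toNat (by omega)
  rw [h2]
  have h3 : ((nums.length : Int) - ((t.toNat : Nat) : Int)).toNat = nums.length - t.toNat := by omega
  rw [h3]

-- last element of a prefix
lemma pv_getLast_take (nums : List Int) (k : Nat) (h1 : 0 < k) (h2 : k ≤ nums.length) :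
    (nums.take k).getLast? = some (nums[k - 1]'(by omega)) := by
  rw [List.getLast?_eq_getElem?]
  rw [List.length_take, Nat.min_eq_left h2, List.getElem?_take]
  simp only [if_pos (by omega : k - 1 < k)]
  exact List.getElem?_eq_getElem (by omega)

-- A's check on a candidate equals B's O(1) test, under the state invariants
lemma pv_ok_eq (nums : List Int) (sufinc : List Bool)
    (hsuf : ∀ t : Int, 0 ≤ t → t ≤ (nums.length : Int) →
      PySem.List.pyGetD sufinc t true
        = decide (List.IsChain (· < ·) (nums.drop ((nums.length : Int) - t).toNat)))
    (tgt : List Int) (j : Int) (hj0 : 0 ≤ j) (hjn : j < (nums.length : Int)) :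
    pvChkA (tgt ++ PySem.List.slice nums (some (j + 1)) none)
      = (decide (List.IsChain (· < ·) tgt) && PySem.List.pyGetD sufinc ((nums.length : Int) - j - 1) true &&
         (match tgt.getLast? with
          | none => true
          | some t => (j + 1 == (nums.length : Int)) ||
                      decide (t < PySem.List.pyGetD nums (j + 1) 0))) := by
  have hm : PySem.List.slice nums (some (j + 1)) none = nums.drop (j + 1).toNat :=
    PySem.List.slice_from _ (by omega)
  rw [hm, pv_chk_eq]
  have hs := hsuf ((nums.length : Int) - j - 1) (by omega) (by omega)
  have hidx : ((nums.length : Int) - ((nums.length : Int) - j - 1)).toNat = (j + 1).toNat := by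
    omega
  rw [hidx] at hs
  rw [hs]
  cases hL : tgt.getLast? with
  | none =>
    have htgt : tgt = [] := List.getLast?_eq_none_iff.mp hL
    subst htgt
    simp
  | some y =>
    by_cases hjn : j + 1 = (nums.length : Int)
    · have hdrop : nums.drop (j + 1).toNat = [] := List.drop_eq_nil_of_le (by omega)
      rw [hdrop]
      have hbeq : ((j + 1 : Int) == (nums.length : Int)) = true := by simp [hjn]
      rw [hbeq]
      rw [Bool.eq_iff_iff]
      simp
    · have hbeq : ((j + 1 : Int) == (nums.length : Int)) = false := by simp [hjn]
      rw [hbeq]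
      have hhead : (nums.drop (j + 1).toNat).head? = some (nums[(j + 1).toNat]'(by omega)) := by
        rw [List.head?_drop]
        exact List.getElem?_eq_getElem (by omega)
      have hg : PySem.List.pyGetD nums (j + 1) 0 = nums[(j + 1).toNat]'(by omega) :=
        PySem.List.pyGetD_eq_getElem _ _ (by omega) (by omega)
      rw [hg, Bool.eq_iff_iff]
      simp only [List.isChain_append, Bool.and_eq_true, Bool.false_or,
        decide_eq_true_eq, hL, hhead, Option.mem_some_iff]
      constructor
      · rintro ⟨h1, h2, h3⟩
        exact ⟨⟨h1, h2⟩, h3 y rfl _ rfl⟩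
      · rintro ⟨⟨h1, h2⟩, h3⟩
        refine ⟨h1, h2, ?_⟩
        rintro a rfl b rfl
        exact h3

-- both loops update res/best identically on a candidate
lemma pv_res_eq (nums : List Int) (sufinc : List Bool)
    (hsuf : ∀ t : Int, 0 ≤ t → t ≤ (nums.length : Int) →
      PySem.List.pyGetD sufinc t true
        = decide (List.IsChain (· < ·) (nums.drop ((nums.length : Int) - t).toNat)))
    (tgt res : List Int) (j : Int) (hj0 : 0 ≤ j) (hjlt : j < (nums.length : Int)) :
    (if pvChkA (tgt ++ PySem.List.slice nums (some (j + 1)) none) &&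
        (res.isEmpty || decide (res.length < (tgt ++ PySem.List.slice nums (some (j + 1)) none).length))
     then tgt ++ PySem.List.slice nums (some (j + 1)) none else res)
    = (if (decide (List.IsChain (· < ·) tgt) &&
           PySem.List.pyGetD sufinc ((nums.length : Int) - j - 1) true &&
           (match tgt.getLast? with
            | none => true
            | some t => (j + 1 == (nums.length : Int)) ||
                        decide (t < PySem.List.pyGetD nums (j + 1) 0))) &&
          (res.isEmpty || decide ((res.length : Int) < (tgt.length : Int) + ((nums.length : Int) - j - 1)))
       then tgt ++ PySem.List.slice nums (some (j + 1)) none else res) := by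
  rw [← pv_ok_eq nums sufinc hsuf tgt j hj0 hjlt]
  have hlen : decide (res.length < (tgt ++ PySem.List.slice nums (some (j + 1)) none).length)
      = decide ((res.length : Int) < (tgt.length : Int) + ((nums.length : Int) - j - 1)) := by
    rw [PySem.List.slice_from _ (by omega), decide_eq_decide]
    rw [List.length_append, List.length_drop]
    omega
  rw [hlen]

-- one synchronized step of the two inner loops
lemma pv_step_eq (nums : List Int) (sufinc : List Bool)
    (hsuf : ∀ t : Int, 0 ≤ t → t ≤ (nums.length : Int) →
      PySem.List.pyGetD sufinc t true
        = decide (List.IsChain (· < ·) (nums.drop ((nums.length : Int) - t).toNat)))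
    (i j : Int) (hj0 : 0 ≤ j) (hjlt : j < (nums.length : Int)) (hij : i ≤ j)
    (sub target res : List Int) (tlast : Option Int) (sublast : Int) (tvalid : Bool)
    (hcase : (i = j ∧ sublast = PySem.List.pyGetD nums j 0) ∨
             (i < j ∧ sub ≠ [] ∧ PySem.List.pyGetD sub (-1) 0 = sublast))
    (htvalid : tvalid = decide (List.IsChain (· < ·) target))
    (htlast : tlast = target.getLast?) :
    ∃ sub₂ target₂ res₂ tlast₂ sublast₂ tvalid₂,
      pvAInner nums i (sub, target, res) j = (sub₂, target₂, res₂) ∧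
      pvBInner nums sufinc (nums.length : Int) i (target, tlast, sublast, res, tvalid) j
        = (target₂, tlast₂, sublast₂, res₂, tvalid₂) ∧
      sub₂ ≠ [] ∧ PySem.List.pyGetD sub₂ (-1) 0 = sublast₂ ∧
      tvalid₂ = decide (List.IsChain (· < ·) target₂) ∧ tlast₂ = target₂.getLast? := by
  subst htvalid htlast
  rcases hcase with ⟨rfl, hsl⟩ | ⟨hlt, hne, hsl⟩
  · have hA : pvAInner nums i (sub, target, res) i
        = (sub ++ [PySem.List.pyGetD nums i 0], target,
           if pvChkA (target ++ PySem.List.slice nums (some (i + 1)) none) &&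
              (res.isEmpty || decide (res.length < (target ++ PySem.List.slice nums (some (i + 1)) none).length))
           then target ++ PySem.List.slice nums (some (i + 1)) none else res) := by
      simp only [pvAInner, beq_self_eq_true, if_true]
    have hltf : decide (i < i) = false := by simp
    have hB : pvBInner nums sufinc (nums.length : Int) i
        (target, target.getLast?, sublast, res, decide (List.IsChain (· < ·) target)) i
        = (target, target.getLast?, sublast,
           if (decide (List.IsChain (· < ·) target) &&
               PySem.List.pyGetD sufinc ((nums.length : Int) - i - 1) true &&
               (match target.getLast? with
                | none => true
                | some t => (i + 1 == (nums.length : Int)) ||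
                            decide (t < PySem.List.pyGetD nums (i + 1) 0))) &&
              (res.isEmpty || decide ((res.length : Int) < (target.length : Int) + ((nums.length : Int) - i - 1)))
           then target ++ PySem.List.slice nums (some (i + 1)) none else res,
           decide (List.IsChain (· < ·) target)) := by
      simp only [pvBInner, hltf, Bool.false_eq_true, if_false]
    rw [pv_res_eq nums sufinc hsuf target res i hj0 hjlt] at hA
    refine ⟨sub ++ [PySem.List.pyGetD nums i 0], target, _, target.getLast?, sublast,
      decide (List.IsChain (· < ·) target), hA, hB, by simp, ?_, rfl, rfl⟩
    rw [PySem.List.pyGetD_neg_one_append_singleton]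
    exact hsl.symm
  · have hbeq : (i == j) = false := by
      simp only [beq_eq_false_iff_ne, ne_eq]
      omega
    have hltb : decide (i < j) = true := by simp [hlt]
    by_cases hxc : PySem.List.pyGetD nums j 0 < sublast
    · -- element goes to target
      have hxA : decide (PySem.List.pyGetD nums j 0 < PySem.List.pyGetD sub (-1) 0) = true := by
        rw [hsl]; simpa using hxc
      have hxB : decide (PySem.List.pyGetD nums j 0 < sublast) = true := by simpa using hxc
      have hval : (if (match target.getLast? with
                       | some t => decide (t ≥ PySem.List.pyGetD nums j 0)
                       | none => false) then false else decide (List.IsChain (· < ·) target))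
          = decide (List.IsChain (· < ·) (target ++ [PySem.List.pyGetD nums j 0])) := by
        rw [pv_chain_concat]
        cases hL : target.getLast? with
        | none => simp
        | some y =>
          by_cases hyx : y ≥ PySem.List.pyGetD nums j 0
          · simp [hyx, not_lt_of_ge hyx]
          · simp [hyx, lt_of_not_ge hyx]
      have hlast2 : (target ++ [PySem.List.pyGetD nums j 0]).getLast?
          = some (PySem.List.pyGetD nums j 0) := List.getLast?_concat
      have hA : pvAInner nums i (sub, target, res) j
          = (sub, target ++ [PySem.List.pyGetD nums j 0],
             if pvChkA ((target ++ [PySem.List.pyGetD nums j 0]) ++ PySem.List.slice nums (some (j + 1)) none) &&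
                (res.isEmpty || decide (res.length < ((target ++ [PySem.List.pyGetD nums j 0]) ++ PySem.List.slice nums (some (j + 1)) none).length))
             then (target ++ [PySem.List.pyGetD nums j 0]) ++ PySem.List.slice nums (some (j + 1)) none else res) := by
        simp only [pvAInner, hbeq, Bool.false_eq_true, if_false, hxA, if_true]
      have hB : pvBInner nums sufinc (nums.length : Int) i
          (target, target.getLast?, sublast, res, decide (List.IsChain (· < ·) target)) j
          = (target ++ [PySem.List.pyGetD nums j 0], some (PySem.List.pyGetD nums j 0), sublast,
             if (decide (List.IsChain (· < ·) (target ++ [PySem.List.pyGetD nums j 0])) &&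
                 PySem.List.pyGetD sufinc ((nums.length : Int) - j - 1) true &&
                 ((j + 1 == (nums.length : Int)) ||
                  decide (PySem.List.pyGetD nums j 0 < PySem.List.pyGetD nums (j + 1) 0))) &&
                (res.isEmpty || decide ((res.length : Int) < ((target ++ [PySem.List.pyGetD nums j 0]).length : Int) + ((nums.length : Int) - j - 1)))
             then (target ++ [PySem.List.pyGetD nums j 0]) ++ PySem.List.slice nums (some (j + 1)) none else res,
             decide (List.IsChain (· < ·) (target ++ [PySem.List.pyGetD nums j 0]))) := by
        simp only [pvBInner, hltb, if_true, hxB, hval]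
      rw [pv_res_eq nums sufinc hsuf (target ++ [PySem.List.pyGetD nums j 0]) res j hj0 hjlt,
        hlast2] at hA
      exact ⟨sub, target ++ [PySem.List.pyGetD nums j 0], _, some (PySem.List.pyGetD nums j 0),
        sublast, decide (List.IsChain (· < ·) (target ++ [PySem.List.pyGetD nums j 0])),
        hA, hB, hne, hsl, rfl, hlast2.symm⟩
    · -- element goes to sub
      have hxA : decide (PySem.List.pyGetD nums j 0 < PySem.List.pyGetD sub (-1) 0) = false := by
        rw [hsl]; simpa using hxc
      have hxB : decide (PySem.List.pyGetD nums j 0 < sublast) = false := by simpa using hxc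
      have hA : pvAInner nums i (sub, target, res) j
          = (sub ++ [PySem.List.pyGetD nums j 0], target,
             if pvChkA (target ++ PySem.List.slice nums (some (j + 1)) none) &&
                (res.isEmpty || decide (res.length < (target ++ PySem.List.slice nums (some (j + 1)) none).length))
             then target ++ PySem.List.slice nums (some (j + 1)) none else res) := by
        simp only [pvAInner, hbeq, Bool.false_eq_true, if_false, hxA]
      have hB : pvBInner nums sufinc (nums.length : Int) i
          (target, target.getLast?, sublast, res, decide (List.IsChain (· < ·) target)) j
          = (target, target.getLast?, PySem.List.pyGetD nums j 0,
             if (decide (List.IsChain (· < ·) target) &&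
                 PySem.List.pyGetD sufinc ((nums.length : Int) - j - 1) true &&
                 (match target.getLast? with
                  | none => true
                  | some t => (j + 1 == (nums.length : Int)) ||
                              decide (t < PySem.List.pyGetD nums (j + 1) 0))) &&
                (res.isEmpty || decide ((res.length : Int) < (target.length : Int) + ((nums.length : Int) - j - 1)))
             then target ++ PySem.List.slice nums (some (j + 1)) none else res,
             decide (List.IsChain (· < ·) target)) := by
        simp only [pvBInner, hltb, if_true, hxB, Bool.false_eq_true, if_false]
      rw [pv_res_eq nums sufinc hsuf target res j hj0 hjlt] at hA
      exact ⟨sub ++ [PySem.List.pyGetD nums j 0], target, _, target.getLast?,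
        PySem.List.pyGetD nums j 0, decide (List.IsChain (· < ·) target),
        hA, hB, by simp, PySem.List.pyGetD_neg_one_append_singleton _ _ _, rfl, rfl⟩

-- the inner loops of A and B stay in lock-step
lemma pv_inner_eq (nums : List Int) (sufinc : List Bool)
    (hsuf : ∀ t : Int, 0 ≤ t → t ≤ (nums.length : Int) →
      PySem.List.pyGetD sufinc t true
        = decide (List.IsChain (· < ·) (nums.drop ((nums.length : Int) - t).toNat)))
    (i : Int) (hi : 0 ≤ i) :
    ∀ (fuel : Nat) (j : Int), i < j → j ≤ (nums.length : Int) →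
      ((nums.length : Int) - j).toNat = fuel →
      ∀ (sub target res : List Int) (tlast : Option Int) (sublast : Int) (tvalid : Bool),
        sub ≠ [] → PySem.List.pyGetD sub (-1) 0 = sublast →
        tvalid = decide (List.IsChain (· < ·) target) → tlast = target.getLast? →
        ((PySem.List.pyRange j (nums.length : Int) 1).foldl (pvAInner nums i) (sub, target, res)).2.2
          = ((PySem.List.pyRange j (nums.length : Int) 1).foldl (pvBInner nums sufinc (nums.length : Int) i)
              (target, tlast, sublast, res, tvalid)).2.2.2.1 := by
  intro fuel
  induction fuel with
  | zero =>
    intro j hij hjn hfuel sub target res tlast sublast tvalid hsub hsublast htvalid htlast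
    rw [PySem.List.pyRange_one_eq_nil (by omega)]
    simp
  | succ fuel ih =>
    intro j hij hjn hfuel sub target res tlast sublast tvalid hsub hsublast htvalid htlast
    rw [PySem.List.pyRange_one_cons (by omega), List.foldl_cons, List.foldl_cons]
    obtain ⟨sub₂, target₂, res₂, tlast₂, sublast₂, tvalid₂, hA, hB, h1, h2, h3, h4⟩ :=
      pv_step_eq nums sufinc hsuf i j (by omega) (by omega) (le_of_lt hij)
        sub target res tlast sublast tvalid (Or.inr ⟨hij, hsub, hsublast⟩) htvalid htlast
    rw [hA, hB]
    exact ih (j + 1) (by omega) (by omega) (by omega) sub₂ target₂ res₂ tlast₂ sublast₂ tvalid₂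
      h1 h2 h3 h4

-- extending the strictly-increasing prefix by one element
lemma pv_prevalid_step (nums : List Int) (i : Int) (hi0 : 0 ≤ i) (hiN : i < (nums.length : Int)) :
    (decide (List.IsChain (· < ·) (nums.take i.toNat)) &&
      ((i == 0) || decide (PySem.List.pyGetD nums (i - 1) 0 < PySem.List.pyGetD nums i 0)))
    = decide (List.IsChain (· < ·) (nums.take (i + 1).toNat)) := by
  have hlt : i.toNat < nums.length := by omega
  have htake : nums.take (i + 1).toNat = nums.take i.toNat ++ [nums[i.toNat]'hlt] := by
    have : (i + 1).toNat = i.toNat + 1 := by omega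
    rw [this, List.take_add_one, List.getElem?_eq_getElem hlt]
    rfl
  rw [htake, pv_chain_concat]
  by_cases hi : i = 0
  · subst hi
    simp
  · have hbeq : ((i : Int) == 0) = false := by simp [hi]
    rw [hbeq]
    have hg2 : PySem.List.pyGetD nums i 0 = nums[i.toNat]'hlt :=
      PySem.List.pyGetD_eq_getElem _ _ (by omega) (by omega)
    have hL : (nums.take i.toNat).getLast? = some (nums[i.toNat - 1]'(by omega)) :=
      pv_getLast_take nums i.toNat (by omega) (by omega)
    have hg1 : PySem.List.pyGetD nums (i - 1) 0 = nums[i.toNat - 1]'(by omega) := by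
      rw [PySem.List.pyGetD_eq_getElem _ _ (by omega) (by omega)]
      congr 1
      omega
    rw [hg1, hg2, hL, Bool.false_or]

-- the outer loops of A and B stay in lock-step
lemma pv_outer_eq (nums : List Int) (sufinc : List Bool)
    (hsuf : ∀ t : Int, 0 ≤ t → t ≤ (nums.length : Int) →
      PySem.List.pyGetD sufinc t true
        = decide (List.IsChain (· < ·) (nums.drop ((nums.length : Int) - t).toNat))) :
    ∀ (fuel : Nat) (i : Int), 0 ≤ i → i ≤ (nums.length : Int) →
      ((nums.length : Int) - i).toNat = fuel →
      ∀ (res best : List Int) (prevalid : Bool), res = best →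
        prevalid = decide (List.IsChain (· < ·) (nums.take i.toNat)) →
        (PySem.List.pyRange i (nums.length : Int) 1).foldl (fun res i =>
            ((PySem.List.pyRange i (nums.length : Int) 1).foldl (pvAInner nums i)
              ([], PySem.List.slice nums none (some i), res)).2.2) res
          = ((PySem.List.pyRange i (nums.length : Int) 1).foldl
              (pvBOuter nums sufinc (nums.length : Int)) (best, prevalid)).1 := by
  intro fuel
  induction fuel with
  | zero =>
    intro i hi0 hin hfuel res best prevalid hres hpre
    rw [PySem.List.pyRange_one_eq_nil (by omega)]
    simpa using hres
  | succ fuel ih =>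
    intro i hi0 hin hfuel res best prevalid hres hpre
    subst hres
    have hiN : i < (nums.length : Int) := by omega
    rw [PySem.List.pyRange_one_cons hiN, List.foldl_cons, List.foldl_cons]
    have htarget : PySem.List.slice nums none (some i) = nums.take i.toNat :=
      PySem.List.slice_to _ hi0
    have htlast0 : (if decide (0 < i) then some (PySem.List.pyGetD nums (i - 1) 0) else none)
        = (nums.take i.toNat).getLast? := by
      by_cases hi : 0 < i
      · rw [if_pos (by simpa using hi)]
        rw [pv_getLast_take nums i.toNat (by omega) (by omega)]
        congr 1
        rw [PySem.List.pyGetD_eq_getElem _ _ (by omega) (by omega)]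
        congr 1
        omega
      · have hi0' : i = 0 := by omega
        subst hi0'
        simp
    -- the first inner-loop step (j = i), then the rest in lock-step
    obtain ⟨sub₂, target₂, res₂, tlast₂, sublast₂, tvalid₂, hA, hB, h1, h2, h3, h4⟩ :=
      pv_step_eq nums sufinc hsuf i i (by omega) hiN le_rfl
        [] (nums.take i.toNat) res ((nums.take i.toNat).getLast?) (PySem.List.pyGetD nums i 0)
        (decide (List.IsChain (· < ·) (nums.take i.toNat)))
        (Or.inl ⟨rfl, rfl⟩) rfl rfl
    have hinner := pv_inner_eq nums sufinc hsuf i hi0 ((nums.length : Int) - (i + 1)).toNat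
      (i + 1) (by omega) (by omega) rfl sub₂ target₂ res₂ tlast₂ sublast₂ tvalid₂ h1 h2 h3 h4
    have hstepA : ((PySem.List.pyRange i (nums.length : Int) 1).foldl (pvAInner nums i)
          ([], PySem.List.slice nums none (some i), res)).2.2
        = ((PySem.List.pyRange (i + 1) (nums.length : Int) 1).foldl (pvAInner nums i)
            (sub₂, target₂, res₂)).2.2 := by
      rw [PySem.List.pyRange_one_cons hiN, List.foldl_cons, htarget, hA]
    have hstepB : pvBOuter nums sufinc (nums.length : Int) (res, prevalid) i
        = (((PySem.List.pyRange (i + 1) (nums.length : Int) 1).foldl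
              (pvBInner nums sufinc (nums.length : Int) i)
              (target₂, tlast₂, sublast₂, res₂, tvalid₂)).2.2.2.1,
           prevalid && ((i == 0) ||
             decide (PySem.List.pyGetD nums (i - 1) 0 < PySem.List.pyGetD nums i 0))) := by
      show (((PySem.List.pyRange i (nums.length : Int) 1).foldl
              (pvBInner nums sufinc (nums.length : Int) i)
              (PySem.List.slice nums none (some i),
               (if decide (0 < i) then some (PySem.List.pyGetD nums (i - 1) 0) else none),
               PySem.List.pyGetD nums i 0, res, prevalid)).2.2.2.1,
             prevalid && ((i == 0) ||
               decide (PySem.List.pyGetD nums (i - 1) 0 < PySem.List.pyGetD nums i 0))) = _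
      rw [PySem.List.pyRange_one_cons hiN, List.foldl_cons, htarget, htlast0, hpre, hB]
    rw [hstepA, hstepB]
    exact ih (i + 1) (by omega) (by omega) (by omega) _ _ _ hinner
      (by rw [hpre, pv_prevalid_step nums i hi0 hiN])

-- ===== VERDICT (by name: the statement is the Claim_ definition above) =====
theorem subsequence_removal_ii_spec : Claim_equal_subsequence_removal_ii := by
  intro nums _
  show subsequence_removal_ii nums = subsequence_removal_ii_alt nums
  have hsuf := pv_suf_spec nums
  have hhead : PySem.List.pyGetD
      ((PySem.List.pyRange 0 (nums.length : Int) 1).foldl (pvSufStep nums (nums.length : Int)) [true])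
      (nums.length : Int) true = decide (List.IsChain (· < ·) nums) := by
    rw [pv_suf_spec nums (nums.length : Int) (by omega) le_rfl]
    simp
  have houter := pv_outer_eq nums _ hsuf nums.length 0 (by omega) (by omega) (by omega)
    [] [] true rfl (by simp)
  show (if pvChkA nums then ([] : List Int)
        else
          let res := (PySem.List.pyRange 0 (nums.length : Int) 1).foldl (fun res i =>
            ((PySem.List.pyRange i (nums.length : Int) 1).foldl (pvAInner nums i)
              ([], PySem.List.slice nums none (some i), res)).2.2) []
          if res.isEmpty then [-1] else res)
      = (if PySem.List.pyGetD ((PySem.List.pyRange 0 (nums.length : Int) 1).foldl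
              (pvSufStep nums (nums.length : Int)) [true]) (nums.length : Int) true
         then ([] : List Int)
         else
           let best := ((PySem.List.pyRange 0 (nums.length : Int) 1).foldl
              (pvBOuter nums ((PySem.List.pyRange 0 (nums.length : Int) 1).foldl
                 (pvSufStep nums (nums.length : Int)) [true]) (nums.length : Int)) ([], true)).1
           if best.isEmpty then [-1] else best)
  rw [pv_chk_eq, hhead]
  by_cases hc : List.IsChain (· < ·) nums
  · simp only [hc, decide_true, if_true]
  · simp only [hc, decide_false, Bool.false_eq_true, if_false]
    rw [houter]
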